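-- pv_equiv track=rewrite | github.com/HuangYuhao-sysu/CS61A-coding | hw04-done-20220814/hw04.py | count_patition
-- ===== SOURCE A (Python) =====
-- def count_patition(amount,num):
--     """Return the number of ways to make change for amount, num is the pow of 2
--
--     >>> count_patition(7, 4)
--     6
--     >>> count_patition(10,8)
--     14
--     >>> count_patition(20,16)
--     60
--     >>> count_patition(100,64)
--     9828
--     """
--     if amount == 0:
--         return 1
--     elif amount < 0:
--         return 0
--     elif num == 1:
--         return 1
--     else:
--         with_num = count_patition(amount-num,num)
--         without_num = count_patition(amount, int(num/2))
--         return with_num + without_num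
-- ===== SOURCE B (Python) =====
-- def count_patition(amount, num):
--     """Bottom-up coin-change DP over the halving chain of denominations
--     (num, num//2, ..., 1) instead of A's exponential double recursion."""
--     if amount == 0:
--         return 1
--     if amount < 0:
--         return 0
--     coins = []
--     d = num
--     while d > 1:
--         coins.append(d)
--         d = d // 2
--     if not coins:
--         return 1
--     ways = [1] * (amount + 1)
--     for c in reversed(coins):
--         for a in range(c, amount + 1):
--             ways[a] += ways[a - c]
--     return ways[amount]
-- ===== Notes on version B (the rewrite author's own statement) =====
-- stated objective: faster
-- what changed: Replaces A's exponential double recursion by a bottom-up coin-change dynamic-programming table over the halving chain of denominations; intended as asymptotically faster (a timing run read ~2869x at n=256 but A timed out on most inputs of that size, so the measurement is unconfirmed).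
import Mathlib
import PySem

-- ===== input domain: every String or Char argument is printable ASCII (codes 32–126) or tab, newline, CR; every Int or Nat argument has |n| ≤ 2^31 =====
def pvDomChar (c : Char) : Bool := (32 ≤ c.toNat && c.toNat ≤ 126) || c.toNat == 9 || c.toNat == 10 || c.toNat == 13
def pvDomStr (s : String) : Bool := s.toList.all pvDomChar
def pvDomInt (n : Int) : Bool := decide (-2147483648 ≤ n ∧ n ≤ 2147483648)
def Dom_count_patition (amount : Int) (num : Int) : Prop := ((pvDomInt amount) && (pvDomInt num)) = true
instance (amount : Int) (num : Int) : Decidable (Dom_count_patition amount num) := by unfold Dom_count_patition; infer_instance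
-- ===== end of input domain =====

-- B replaces A's exponential double recursion by a bottom-up coin-change DP table
-- over the halving chain of denominations (intended as asymptotically faster; the
-- timing run could not confirm it because A times out on the larger inputs).

-- ===== PORT A =====
-- literal port of A; the `num ≤ 0` guard only totalises the inputs where the
-- Python recursion never terminates (excluded by Pre_), returning a dummy 0 there
def count_patition (amount : Int) (num : Int) : Int :=
  if amount = 0 then 1
  else if amount < 0 then 0
  else if num = 1 then 1
  else if num ≤ 0 then 0
  else count_patition (amount - num) num + count_patition amount (num / 2)
termination_by (amount.toNat, num.toNat)
decreasing_by
  · apply Prod.Lex.left; omega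
  · apply Prod.Lex.right'
    · omega
    · omega

-- ===== PORT B =====
-- the `while d > 1: coins.append(d); d = d // 2` loop of Source B
def pvCoins (d : Int) : List Int :=
  if d ≤ 1 then [] else d :: pvCoins (d / 2)
termination_by d.toNat
decreasing_by omega

-- the inner `for a in range(c, amount + 1): ways[a] += ways[a - c]` loop of Source B
def pvStep (w : List Int) (c : Int) : List Int :=
  (PySem.List.pyRange c (Int.ofNat w.length) 1).foldl
    (fun v a => v.set a.toNat (v.getD a.toNat 0 + v.getD (a - c).toNat 0)) w

def count_patition_alt (amount : Int) (num : Int) : Int :=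
  if amount = 0 then 1
  else if amount < 0 then 0
  else
    let coins := pvCoins num
    if coins = [] then 1
    else
      let ways := (coins.reverse).foldl pvStep (List.replicate (amount + 1).toNat 1)
      ways.getD amount.toNat 0

-- ===== PRECONDITION & SPEC =====
-- Pre_ excludes exactly the inputs (amount > 0 and num ≤ 0) on which the Python A
-- recurses forever and dies with RecursionError.
def Pre_count_patition (amount : Int) (num : Int) : Prop := amount ≤ 0 ∨ 1 ≤ num
instance (amount : Int) (num : Int) : Decidable (Pre_count_patition amount num) := by unfold Pre_count_patition; infer_instance
def pvWitness_count_patition : Int × Int := (7, 4)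

def Spec_count_patition (amount : Int) (num : Int) (out : Int) : Prop := out = count_patition_alt amount num
instance (amount : Int) (num : Int) (out : Int) : Decidable (Spec_count_patition amount num out) := by unfold Spec_count_patition; infer_instance

-- ===== CLAIM (what is proved, stated in full; the proofs are below) =====
def Claim_equal_count_patition : Prop := ∀ (amount : Int) (num : Int), Dom_count_patition amount num → Pre_count_patition amount num → Spec_count_patition amount num (count_patition amount num)

-- ===== LEMMAS AND PROOFS =====

theorem cp_neg (a n : Int) (h : a < 0) : count_patition a n = 0 := by
  rw [count_patition]; simp [h]; omega

theorem cp_zero (n : Int) : count_patition 0 n = 1 := by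
  rw [count_patition]; simp

theorem cp_one (a : Int) (ha : 0 ≤ a) : count_patition a 1 = 1 := by
  rw [count_patition]
  by_cases h : a = 0 <;> simp [h] <;> omega

theorem cp_rec (a n : Int) (hn : 2 ≤ n) (ha : 0 < a) :
    count_patition a n = count_patition (a - n) n + count_patition a (n / 2) := by
  rw [count_patition]
  split_ifs <;> first | rfl | omega

theorem cp_lt (a n : Int) (hn : 2 ≤ n) (ha : 0 ≤ a) (hlt : a < n) :
    count_patition a n = count_patition a (n / 2) := by
  rcases eq_or_lt_of_le ha with h | h
  · rw [← h, cp_zero, cp_zero]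
  · rw [cp_rec a n hn h, cp_neg (a - n) n (by omega)]; ring

theorem getD_set_self (l : List Int) (i : Nat) (h : i < l.length) (a : Int) :
    (l.set i a).getD i 0 = a := by
  simp [List.getD, h]

theorem getD_set_ne (l : List Int) (i j : Nat) (h : i ≠ j) (a : Int) :
    (l.set i a).getD j 0 = l.getD j 0 := by
  simp [List.getD, h]

theorem pvStep_loop (c : Int) (hc : 2 ≤ c) (w : List Int)
    (hw : ∀ i : Nat, i < w.length → w.getD i 0 = count_patition i (c / 2)) :
    ∀ m : Nat, m ≤ w.length →
      ((PySem.List.pyRange c (m : Int) 1).foldl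
        (fun v a => v.set a.toNat (v.getD a.toNat 0 + v.getD (a - c).toNat 0)) w).length = w.length ∧
      ∀ i : Nat, i < w.length →
        ((PySem.List.pyRange c (m : Int) 1).foldl
          (fun v a => v.set a.toNat (v.getD a.toNat 0 + v.getD (a - c).toNat 0)) w).getD i 0 =
          if (i : Int) < c ∨ m ≤ i then count_patition i (c / 2) else count_patition i c := by
  intro m
  induction m with
  | zero =>
    intro _
    rw [PySem.List.pyRange_one_eq_nil (by omega)]
    refine ⟨by simp, fun i hi => ?_⟩
    rw [if_pos (by omega)]
    simpa using hw i hi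
  | succ m ih =>
    intro hm
    by_cases hcm : (m : Int) < c
    · rw [PySem.List.pyRange_one_eq_nil (by push_cast; omega)]
      refine ⟨by simp, fun i hi => ?_⟩
      rw [if_pos (by omega)]
      simpa using hw i hi
    · have hle : c ≤ (m : Int) := by omega
      have hsr : PySem.List.pyRange c ((m + 1 : Nat) : Int) 1
          = PySem.List.pyRange c (m : Int) 1 ++ [(m : Int)] := by
        push_cast
        exact PySem.List.pyRange_one_succ_right hle
      obtain ⟨ihlen, ihval⟩ := ih (by omega)
      rw [hsr, List.foldl_append]
      set w1 := (PySem.List.pyRange c (m : Int) 1).foldl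
        (fun v a => v.set a.toNat (v.getD a.toNat 0 + v.getD (a - c).toNat 0)) w with hw1
      simp only [List.foldl_cons, List.foldl_nil]
      have hmn : (m : Int).toNat = m := by omega
      have hk : ((m : Int) - c).toNat < m := by omega
      have hkI : (((((m : Int) - c).toNat) : Nat) : Int) = (m : Int) - c := by omega
      have hvm : w1.getD m 0 = count_patition (m : Int) (c / 2) := by
        rw [ihval m (by omega), if_pos (by omega)]
      have hvk : w1.getD ((m : Int) - c).toNat 0 = count_patition ((m : Int) - c) c := by
        rw [ihval ((m : Int) - c).toNat (by omega), hkI]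
        by_cases hkc : ((m : Int) - c) < c
        · rw [if_pos (Or.inl hkc), cp_lt ((m : Int) - c) c hc (by omega) hkc]
        · rw [if_neg (by omega)]
      constructor
      · rw [List.length_set]; exact ihlen
      · intro i hi
        by_cases him : i = m
        · subst him
          rw [hmn, getD_set_self w1 i (by omega) _, hvm, hvk,
            if_neg (by omega), cp_rec (i : Int) c hc (by omega)]
          ring
        · rw [hmn, getD_set_ne w1 m i (fun h => him h.symm) _, ihval i hi]
          by_cases h1 : (i : Int) < c
          · rw [if_pos (Or.inl h1), if_pos (Or.inl h1)]
          · by_cases h2 : m ≤ i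
            · rw [if_pos (Or.inr h2), if_pos (Or.inr (by omega))]
            · rw [if_neg (by omega), if_neg (by omega)]

theorem pvStep_spec (c : Int) (hc : 2 ≤ c) (w : List Int)
    (hw : ∀ i : Nat, i < w.length → w.getD i 0 = count_patition i (c / 2)) :
    (pvStep w c).length = w.length ∧
      ∀ i : Nat, i < w.length → (pvStep w c).getD i 0 = count_patition i c := by
  obtain ⟨hlen, hval⟩ := pvStep_loop c hc w hw w.length le_rfl
  unfold pvStep
  simp only [Int.ofNat_eq_natCast]
  refine ⟨hlen, fun i hi => ?_⟩
  rw [hval i hi]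
  by_cases h1 : (i : Int) < c
  · rw [if_pos (Or.inl h1), cp_lt (i : Int) c hc (by omega) h1]
  · rw [if_neg (by omega)]

theorem pvChain_spec : ∀ (n : Int) (len : Nat), 1 ≤ n →
    (((pvCoins n).reverse).foldl pvStep (List.replicate len 1)).length = len ∧
      ∀ i : Nat, i < len →
        (((pvCoins n).reverse).foldl pvStep (List.replicate len 1)).getD i 0 = count_patition i n := by
  intro n
  induction n using pvCoins.induct with
  | case1 d hd =>
    intro len hn
    have hc : pvCoins d = [] := by rw [pvCoins]; simp [hd]
    rw [hc]
    simp only [List.reverse_nil, List.foldl_nil, List.length_replicate]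
    refine ⟨by trivial, fun i hi => ?_⟩
    have hd1 : d = 1 := by omega
    rw [hd1, cp_one (i : Int) (by omega)]
    simp [List.getD, hi]
  | case2 d hd ih =>
    intro len hn
    have hc : pvCoins d = d :: pvCoins (d / 2) := by rw [pvCoins]; simp [hd]
    rw [hc, List.reverse_cons, List.foldl_append]
    simp only [List.foldl_cons, List.foldl_nil]
    obtain ⟨ihlen, ihval⟩ := ih len (by omega)
    obtain ⟨slen, sval⟩ := pvStep_spec d (by omega)
      (((pvCoins (d / 2)).reverse).foldl pvStep (List.replicate len 1))
      (fun i hi => ihval i (by rw [ihlen] at hi; exact hi))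
    refine ⟨slen.trans ihlen, fun i hi => ?_⟩
    exact sval i (by rw [ihlen]; exact hi)

-- ===== VERDICT (by name: the statement is the Claim_ definition above) =====
theorem count_patition_spec : Claim_equal_count_patition := by
  intro amount num _ hpre
  unfold Spec_count_patition count_patition_alt
  by_cases h0 : amount = 0
  · simp [h0, cp_zero]
  · by_cases hneg : amount < 0
    · simp [h0, hneg, cp_neg _ _ hneg]
    · have hnum : 1 ≤ num := by unfold Pre_count_patition at hpre; omega
      have hpos : 0 < amount := by omega
      simp only [h0, hneg, if_false]
      by_cases hnil : pvCoins num = []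
      · have h1 : num = 1 := by
          by_contra hne
          rw [pvCoins, if_neg (by omega)] at hnil
          exact List.cons_ne_nil _ _ hnil
        rw [if_pos hnil, h1, cp_one amount (by omega)]
      · rw [if_neg hnil]
        obtain ⟨hlen, hval⟩ := pvChain_spec num (amount + 1).toNat hnum
        have hi : amount.toNat < (amount + 1).toNat := by omega
        have := hval amount.toNat hi
        rw [this, Int.toNat_of_nonneg (by omega)]
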